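-- pv_equiv track=rewrite | github.com/BillDuke13/move-gpt | dataset/main.py | remove_license
-- ===== SOURCE A (Python) =====
-- def remove_license(code):
--     """
--     Removes the Apache license text from the code.
--     Looks for the 'module' keyword and returns all lines from there onwards.
--     If 'module' is not found, returns the original code.
--     """
--     lines = code.split("\n")
--     module_index = None
--     for i, line in enumerate(lines):
--         if line.startswith("module"):
--             module_index = i
--             break
--     if module_index is not None:
--         return "\n".join(lines[module_index:]).strip()
--     else:
--         return code.strip()
-- ===== SOURCE B (Python) =====
-- def remove_license(code):
--     """String-scan version: find the offset of the first line that starts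
--     with 'module' directly in the raw string instead of splitting into lines."""
--     if code.startswith("module"):
--         return code.strip()
--     j = code.find("\nmodule")
--     if j != -1:
--         return code[j + 1:].strip()
--     return code.strip()
-- ===== Notes on version B (the rewrite author's own statement) =====
-- stated objective: idiomatic
-- what changed: B never builds the list of lines: instead of splitting on '\n', scanning lines with startswith and re-joining the suffix, it locates the first line starting with 'module' directly in the raw string via startswith/find('\nmodule') and returns one slice, stripped.
import Mathlib
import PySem

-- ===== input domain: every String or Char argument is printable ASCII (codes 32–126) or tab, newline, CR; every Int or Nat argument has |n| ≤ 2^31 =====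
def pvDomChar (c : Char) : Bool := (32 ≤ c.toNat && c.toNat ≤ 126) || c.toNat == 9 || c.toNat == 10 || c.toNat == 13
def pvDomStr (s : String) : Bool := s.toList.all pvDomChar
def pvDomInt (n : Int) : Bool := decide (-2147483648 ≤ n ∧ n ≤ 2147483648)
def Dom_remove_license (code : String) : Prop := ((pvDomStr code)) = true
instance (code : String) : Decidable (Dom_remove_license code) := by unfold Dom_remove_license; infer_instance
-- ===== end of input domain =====

-- B replaces A's split-into-lines pass by a direct scan of the raw string
-- (startswith / find("\nmodule") / one slice); same return value, no line list built.

-- ===== PORT A =====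
-- the 'for i, line in enumerate(lines): if line.startswith("module"): module_index = i; break' loop
def remove_license_loop : List (Int × String) → Option Int
  | [] => none
  | (i, line) :: rest =>
    if PySem.Str.startswith line "module" then some i else remove_license_loop rest

def remove_license (code : String) : String :=
  let lines := (PySem.Str.split? code "\n").getD []  -- sep "\n" ≠ "": split? never raises
  match remove_license_loop (PySem.List.enumerate lines) with
  | some i => PySem.Str.strip (PySem.Str.join "\n" (PySem.List.slice lines (some i) none))
  | none => PySem.Str.strip code

-- ===== PORT B =====
def remove_license_alt (code : String) : String :=
  if PySem.Str.startswith code "module" then PySem.Str.strip code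
  else
    let j := PySem.Str.find code "\nmodule"
    if j ≠ -1 then PySem.Str.strip (PySem.Str.slice code (some (j + 1)) none)
    else PySem.Str.strip code

-- ===== PRECONDITION & SPEC =====
def Spec_remove_license (code : String) (out : String) : Prop := out = remove_license_alt code
instance (code : String) (out : String) : Decidable (Spec_remove_license code out) := by unfold Spec_remove_license; infer_instance

-- ===== CLAIM (what is proved, stated in full; the proofs are below) =====
def Claim_equal_remove_license : Prop := ∀ (code : String), Dom_remove_license code → Spec_remove_license code (remove_license code)

-- ===== LEMMAS AND PROOFS =====

-- "module".toList and "\nmodule".toList as char lists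
def pvMod : List Char := ['m', 'o', 'd', 'u', 'l', 'e']
def pvPat : List Char := '\n' :: pvMod

-- structural counterpart of Python's str.split("\n") on char lists
def pvSplit : List Char → List Char → List (List Char)
  | pre, [] => [pre]
  | pre, c :: t => if c = '\n' then pre :: pvSplit [] t else pvSplit (pre ++ [c]) t

-- first index of a line starting with "module"
def pvFm : List (List Char) → Option Nat
  | [] => none
  | l :: r => if PySem.Chars.startswith l pvMod then some 0 else (pvFm r).map (· + 1)

lemma pv_go_eq : ∀ (fuel : Nat) (l cur : List Char) (acc : List (List Char)),
    l.length ≤ fuel →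
    PySem.Chars.splitOn.go ['\n'] fuel l cur acc = acc.reverse ++ pvSplit cur.reverse l := by
  intro fuel
  induction fuel with
  | zero =>
    intro l cur acc h
    have hl : l = [] := by simpa using h
    subst hl
    simp [PySem.Chars.splitOn.go, pvSplit]
  | succ n ih =>
    intro l cur acc h
    cases l with
    | nil => simp [PySem.Chars.splitOn.go, pvSplit]
    | cons c rest =>
      by_cases hc : c = '\n'
      · subst hc
        rw [show PySem.Chars.splitOn.go ['\n'] (n+1) ('\n'::rest) cur acc
              = PySem.Chars.splitOn.go ['\n'] n rest [] (cur.reverse :: acc) from by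
            simp [PySem.Chars.splitOn.go, List.isPrefixOf]]
        rw [ih rest [] (cur.reverse :: acc) (by simpa using Nat.lt_succ_iff.mp (by simpa using h))]
        simp [pvSplit]
      · rw [show PySem.Chars.splitOn.go ['\n'] (n+1) (c::rest) cur acc
              = PySem.Chars.splitOn.go ['\n'] n rest (c :: cur) acc from by
            simp [PySem.Chars.splitOn.go, List.isPrefixOf, Ne.symm hc]]
        rw [ih rest (c :: cur) acc (by simpa using Nat.lt_succ_iff.mp (by simpa using h))]
        simp [pvSplit, hc]

lemma pv_splitOn_eq (cs : List Char) :
    PySem.Chars.splitOn cs ['\n'] = pvSplit [] cs := by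
  unfold PySem.Chars.splitOn
  rw [pv_go_eq (cs.length + 1) cs [] [] (by omega)]
  simp

lemma pv_split_ne_nil : ∀ (pre cs : List Char), pvSplit pre cs ≠ [] := by
  intro pre cs
  cases cs with
  | nil => simp [pvSplit]
  | cons c t =>
    simp only [pvSplit]
    split
    · simp
    · exact pv_split_ne_nil (pre ++ [c]) t

-- join is the inverse of pvSplit
lemma pv_join_split (cs : List Char) : ∀ pre,
    PySem.Chars.join ['\n'] (pvSplit pre cs) = pre ++ cs := by
  induction cs with
  | nil => intro pre; simp [pvSplit, PySem.Chars.join, List.intercalate]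
  | cons c t ih =>
    intro pre
    by_cases hc : c = '\n'
    · subst hc
      have hne : pvSplit [] t ≠ [] := pv_split_ne_nil [] t
      simp only [pvSplit, ite_true]
      obtain ⟨b, r, hbr⟩ : ∃ b r, pvSplit [] t = b :: r := by
        cases h : pvSplit [] t with
        | nil => exact absurd h hne
        | cons b r => exact ⟨b, r, rfl⟩
      have := ih []
      rw [hbr] at this ⊢
      simp only [PySem.Chars.join, List.intercalate, List.intersperse] at this ⊢
      cases r <;> simp_all
    · simp only [pvSplit, if_neg hc]
      rw [ih (pre ++ [c])]
      simp

lemma pv_split_no_nl (cs : List Char) (h : '\n' ∉ cs) : ∀ pre, pvSplit pre cs = [pre ++ cs] := by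
  induction cs with
  | nil => intro pre; simp [pvSplit]
  | cons c t ih =>
    intro pre
    have hc : c ≠ '\n' := fun hh => h (hh ▸ List.mem_cons_self)
    have ht : '\n' ∉ t := fun hh => h (List.mem_cons_of_mem _ hh)
    simp only [pvSplit, if_neg hc]
    rw [ih ht (pre ++ [c])]
    simp

lemma pv_split_cons (l t : List Char) (h : '\n' ∉ l) : ∀ pre,
    pvSplit pre (l ++ '\n' :: t) = (pre ++ l) :: pvSplit [] t := by
  induction l with
  | nil => intro pre; simp [pvSplit]
  | cons c l' ih =>
    intro pre
    have hc : c ≠ '\n' := fun hh => h (hh ▸ List.mem_cons_self)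
    have hl : '\n' ∉ l' := fun hh => h (List.mem_cons_of_mem _ hh)
    simp only [List.cons_append, pvSplit, if_neg hc]
    rw [ih hl (pre ++ [c])]
    simp

-- a '\n'-free pattern is a prefix of l ++ '\n'::t iff it is a prefix of l
lemma pv_prefix_nl (pat : List Char) (hp : '\n' ∉ pat) (l t : List Char) :
    pat <+: (l ++ '\n' :: t) ↔ pat <+: l := by
  induction l generalizing pat with
  | nil =>
    cases pat with
    | nil => simp
    | cons p ps =>
      simp only [List.nil_append]
      constructor
      · intro hpre
        obtain ⟨h1, _⟩ := (List.cons_prefix_cons).mp hpre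
        exact absurd (h1 ▸ List.mem_cons_self) hp
      · intro hpre
        exact absurd hpre (by simp)
  | cons a l' ih =>
    cases pat with
    | nil => simp
    | cons p ps =>
      have hps : '\n' ∉ ps := fun hh => hp (List.mem_cons_of_mem _ hh)
      simp only [List.cons_append, List.cons_prefix_cons]
      rw [ih ps hps]

-- decomposition at the first newline
lemma pv_first_nl (cs : List Char) (h : '\n' ∈ cs) :
    ∃ l t, cs = l ++ '\n' :: t ∧ '\n' ∉ l := by
  induction cs with
  | nil => simp at h
  | cons c t ih =>
    by_cases hc : c = '\n'
    · exact ⟨[], t, by simp [hc], by simp⟩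
    · have : '\n' ∈ t := by
        rcases List.mem_cons.mp h with h1 | h1
        · exact absurd h1.symm hc
        · exact h1
      obtain ⟨l, t', h1, h2⟩ := ih this
      exact ⟨c :: l, t', by simp [h1], by simp [Ne.symm hc, h2]⟩

-- drop past the separator
lemma pv_drop_shift (l t : List Char) (i : Nat) (h : l.length + 1 ≤ i) :
    (l ++ '\n' :: t).drop i = t.drop (i - l.length - 1) := by
  induction l generalizing i with
  | nil =>
    obtain ⟨i', rfl⟩ : ∃ i', i = i' + 1 := ⟨i - 1, by omega⟩
    simp
  | cons a l' ih =>
    obtain ⟨i', rfl⟩ : ∃ i', i = i' + 1 := ⟨i - 1, by omega⟩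
    simp only [List.cons_append, List.drop_succ_cons]
    rw [ih i' (by simpa using h)]
    simp

-- find never occurs strictly inside the newline-free part
lemma pv_no_occ_lt (l t : List Char) (h : '\n' ∉ l) (i : Nat) (hi : i < l.length) :
    ¬ pvPat <+: (l ++ '\n' :: t).drop i := by
  intro hpre
  have hdrop : (l ++ '\n' :: t).drop i = l.drop i ++ '\n' :: t := by
    rw [List.drop_append_of_le_length (by omega)]
  rw [hdrop] at hpre
  have hne : l.drop i ≠ [] := by
    intro hh; have := List.drop_eq_nil_iff.mp hh; omega
  obtain ⟨d, ds, hds⟩ := List.exists_cons_of_ne_nil hne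
  rw [hds] at hpre
  obtain ⟨h1, _⟩ := (List.cons_prefix_cons).mp (by simpa [pvPat] using hpre)
  have : d ∈ l := by
    have : d ∈ l.drop i := hds ▸ List.mem_cons_self
    exact List.mem_of_mem_drop this
  exact h (h1 ▸ this)

-- characterisation of find: the unique first-occurrence position
lemma pv_find_eq (cs sub : List Char) (k : Nat) (h1 : sub <+: cs.drop k)
    (h2 : ∀ i < k, ¬ sub <+: cs.drop i) : PySem.Chars.find cs sub = k := by
  have hinf : sub <:+: cs := (h1.isInfix).trans (List.drop_suffix k cs).isInfix
  have hpos : 0 ≤ PySem.Chars.find cs sub := (PySem.Chars.find_nonneg_iff cs sub).mpr hinf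
  obtain ⟨hs1, hs2⟩ := PySem.Chars.find_spec hpos
  set f := (PySem.Chars.find cs sub).toNat with hf
  have : f = k := by
    rcases Nat.lt_trichotomy f k with hh | hh | hh
    · exact absurd hs1 (h2 f hh)
    · exact hh
    · exact absurd h1 (hs2 k hh)
  omega

-- occurrence analysis across the first newline
lemma pv_occ_iff (l t : List Char) (h : '\n' ∉ l) :
    pvPat <:+: (l ++ '\n' :: t) ↔ pvMod <+: t ∨ pvPat <:+: t := by
  constructor
  · intro hinf
    obtain ⟨i, hi⟩ : ∃ i, pvPat <+: (l ++ '\n' :: t).drop i := by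
      rw [PySem.Chars.exists_prefix_drop_iff_isIn, PySem.Chars.isIn_iff_infix]
      exact hinf
    rcases Nat.lt_trichotomy i l.length with hh | hh | hh
    · exact absurd hi (pv_no_occ_lt l t h i hh)
    · subst hh
      rw [List.drop_left] at hi
      exact Or.inl ((List.cons_prefix_cons.mp hi).2)
    · right
      rw [pv_drop_shift l t i (by omega)] at hi
      exact (hi.isInfix).trans (List.drop_suffix _ t).isInfix
  · intro hor
    rcases hor with hm | hinf
    · have : pvPat <+: (l ++ '\n' :: t).drop l.length := by
        rw [List.drop_left]
        exact List.cons_prefix_cons.mpr ⟨rfl, hm⟩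
      exact (this.isInfix).trans (List.drop_suffix _ _).isInfix
    · have hsuf : t <:+ (l ++ '\n' :: t) := ⟨l ++ ['\n'], by simp⟩
      exact hinf.trans hsuf.isInfix

lemma pv_find_at (l t : List Char) (h : '\n' ∉ l) (hm : pvMod <+: t) :
    PySem.Chars.find (l ++ '\n' :: t) pvPat = (l.length : Int) := by
  apply pv_find_eq
  · rw [List.drop_append_of_le_length (by omega)]
    simp [pvPat, List.cons_prefix_cons, hm]
  · intro i hi
    exact pv_no_occ_lt l t h i hi

lemma pv_find_shift (l t : List Char) (h : '\n' ∉ l) (hm : ¬ pvMod <+: t)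
    (j : Nat) (hj : PySem.Chars.find t pvPat = (j : Int)) :
    PySem.Chars.find (l ++ '\n' :: t) pvPat = ((l.length + 1 + j : Nat) : Int) := by
  obtain ⟨hs1, hs2⟩ := PySem.Chars.find_spec (s := t) (sub := pvPat) (by rw [hj]; exact_mod_cast Int.natCast_nonneg j)
  rw [hj] at hs1 hs2
  simp only [Int.toNat_natCast] at hs1 hs2
  apply pv_find_eq
  · rw [pv_drop_shift l t _ (by omega)]
    have : l.length + 1 + j - l.length - 1 = j := by omega
    rw [this]
    exact hs1
  · intro i hi hpre
    rcases Nat.lt_trichotomy i l.length with hh | hh | hh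
    · exact pv_no_occ_lt l t h i hh hpre
    · subst hh
      rw [List.drop_left] at hpre
      exact hm ((List.cons_prefix_cons.mp hpre).2)
    · rw [pv_drop_shift l t i (by omega)] at hpre
      exact hs2 (i - l.length - 1) (by omega) hpre

lemma pv_find_none_shift (l t : List Char) (h : '\n' ∉ l) (hm : ¬ pvMod <+: t)
    (hj : PySem.Chars.find t pvPat = -1) :
    PySem.Chars.find (l ++ '\n' :: t) pvPat = -1 := by
  rw [PySem.Chars.find_eq_neg_one_iff]
  intro hinf
  rcases (pv_occ_iff l t h).mp hinf with h1 | h1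
  · exact hm h1
  · exact (PySem.Chars.find_eq_neg_one_iff t pvPat).mp hj h1

-- "no module line" ↔ "neither at the start nor after any newline"
lemma pv_none_iff (n : Nat) : ∀ cs : List Char, cs.length ≤ n →
    (pvFm (pvSplit [] cs) = none ↔
      (¬ pvMod <+: cs ∧ ¬ pvPat <:+: cs)) := by
  induction n with
  | zero =>
    intro cs hlen
    have : cs = [] := by simpa using hlen
    subst this
    simp [pvSplit, pvFm, PySem.Chars.startswith_iff, pvMod, pvPat]
  | succ n ih =>
    intro cs hlen
    by_cases hnl : '\n' ∈ cs
    · obtain ⟨l, t, rfl, hl⟩ := pv_first_nl cs hnl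
      rw [pv_split_cons l t hl []]
      have hiht := ih t (by simp at hlen; omega)
      simp only [List.nil_append, pvFm]
      by_cases hsw : PySem.Chars.startswith l pvMod
      · simp only [hsw, if_true]
        have hml : pvMod <+: l := (PySem.Chars.startswith_iff l pvMod).mp hsw
        have : pvMod <+: (l ++ '\n' :: t) := hml.trans (List.prefix_append l _)
        simp [this]
      · simp only [hsw, if_false, Option.map_eq_none_iff, Bool.false_eq_true]
        rw [hiht]
        have hnm : '\n' ∉ pvMod := by decide
        rw [pv_prefix_nl pvMod hnm l t, pv_occ_iff l t hl]
        have hml : ¬ pvMod <+: l := fun hh => hsw ((PySem.Chars.startswith_iff l pvMod).mpr hh)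
        have hswt : pvMod <+: t ↔ PySem.Chars.startswith t pvMod = true :=
          (PySem.Chars.startswith_iff t pvMod).symm
        constructor
        · rintro ⟨h1, h2⟩
          exact ⟨hml, fun hh => hh.elim (fun a => h1 a) h2⟩
        · rintro ⟨_, h2⟩
          exact ⟨fun a => h2 (Or.inl a), fun a => h2 (Or.inr a)⟩
    · rw [pv_split_no_nl cs hnl []]
      simp only [List.nil_append, pvFm]
      have hninf : ¬ pvPat <:+: cs := fun hh => hnl (hh.subset (by simp [pvPat]))
      by_cases hsw : PySem.Chars.startswith cs pvMod
      · simp [hsw, (PySem.Chars.startswith_iff cs pvMod).mp hsw]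
      · have hmp : ¬ pvMod <+: cs := fun hh => hsw ((PySem.Chars.startswith_iff cs pvMod).mpr hh)
        simp [hsw, hninf, hmp]

-- the two programs' pre-strip results, on char lists
def pvA (cs : List Char) : List Char :=
  match pvFm (pvSplit [] cs) with
  | some i => PySem.Chars.join ['\n'] ((pvSplit [] cs).drop i)
  | none => cs

def pvB (cs : List Char) : List Char :=
  if PySem.Chars.startswith cs pvMod then cs
  else if PySem.Chars.find cs pvPat = -1 then cs
  else cs.drop (PySem.Chars.find cs pvPat + 1).toNat

-- the core equivalence, on char lists, before stripping
lemma pv_main (n : Nat) : ∀ cs : List Char, cs.length ≤ n → pvA cs = pvB cs := by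
  induction n with
  | zero =>
    intro cs hlen
    have : cs = [] := by simpa using hlen
    subst this
    decide
  | succ n ih =>
    intro cs hlen
    by_cases hnl : '\n' ∈ cs
    · obtain ⟨l, t, rfl, hl⟩ := pv_first_nl cs hnl
      have hlent : t.length ≤ n := by simp at hlen; omega
      by_cases hsw : PySem.Chars.startswith l pvMod
      · have hml := (PySem.Chars.startswith_iff l pvMod).mp hsw
        have hcs : PySem.Chars.startswith (l ++ '\n' :: t) pvMod = true :=
          (PySem.Chars.startswith_iff _ _).mpr (hml.trans (l.prefix_append _))
        have hfm0 : pvFm (pvSplit [] (l ++ '\n' :: t)) = some 0 := by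
          rw [pv_split_cons l t hl []]
          simp [pvFm, hsw]
        simp only [pvA, pvB, hfm0, hcs, if_true, List.drop_zero]
        rw [pv_join_split (l ++ '\n' :: t) []]
        simp
      · have hcsw : PySem.Chars.startswith (l ++ '\n' :: t) pvMod = false := by
          rw [Bool.eq_false_iff]
          intro hh
          have h2 : pvMod <+: l :=
            (pv_prefix_nl pvMod (by decide) l t).mp ((PySem.Chars.startswith_iff _ _).mp hh)
          exact hsw ((PySem.Chars.startswith_iff l pvMod).mpr h2)
        cases hfm : pvFm (pvSplit [] t) with
        | none =>
          obtain ⟨hm, hinf⟩ := (pv_none_iff n t hlent).mp hfm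
          have hfmc : pvFm (pvSplit [] (l ++ '\n' :: t)) = none := by
            rw [pv_split_cons l t hl []]
            simp [pvFm, hsw, hfm]
          have hfind : PySem.Chars.find (l ++ '\n' :: t) pvPat = -1 :=
            pv_find_none_shift l t hl hm ((PySem.Chars.find_eq_neg_one_iff t pvPat).mpr hinf)
          simp [pvA, pvB, hfmc, hcsw, hfind]
        | some m =>
          have hfmc : pvFm (pvSplit [] (l ++ '\n' :: t)) = some (m + 1) := by
            rw [pv_split_cons l t hl []]
            simp [pvFm, hsw, hfm]
          have hA : pvA (l ++ '\n' :: t) = pvA t := by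
            simp only [pvA, hfmc, hfm]
            rw [pv_split_cons l t hl []]
            simp
          rw [hA, ih t hlent]
          have hmt : pvMod <+: t ∨ pvPat <:+: t := by
            by_contra hc
            rw [not_or] at hc
            have : pvFm (pvSplit [] t) = none := (pv_none_iff n t hlent).mpr ⟨hc.1, hc.2⟩
            simp [this] at hfm
          by_cases hswt : PySem.Chars.startswith t pvMod
          · -- next line starts the module block: find hits the separator before t
            have hmT := (PySem.Chars.startswith_iff t pvMod).mp hswt
            have hfind := pv_find_at l t hl hmT
            have hne : PySem.Chars.find (l ++ '\n' :: t) pvPat ≠ -1 := by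
              rw [hfind]; omega
            simp only [pvB, hswt, hcsw, if_true, Bool.false_eq_true, if_false, hfind]
            rw [show ((l.length : Int) + 1).toNat = l.length + 1 from by omega]
            rw [pv_drop_shift l t (l.length + 1) (by omega)]
            simp
          · have hinfT : pvPat <:+: t := by
              rcases hmt with h1 | h1
              · exact absurd ((PySem.Chars.startswith_iff t pvMod).mpr h1) hswt
              · exact h1
            have hpos : 0 ≤ PySem.Chars.find t pvPat :=
              (PySem.Chars.find_nonneg_iff t pvPat).mpr hinfT
            set j := (PySem.Chars.find t pvPat).toNat with hj
            have hjeq : PySem.Chars.find t pvPat = (j : Int) := by omega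
            have hmnT : ¬ pvMod <+: t := fun hh => hswt ((PySem.Chars.startswith_iff t pvMod).mpr hh)
            have hfind := pv_find_shift l t hl hmnT j hjeq
            have hneT : PySem.Chars.find t pvPat ≠ -1 := by omega
            have hne : PySem.Chars.find (l ++ '\n' :: t) pvPat ≠ -1 := by
              rw [hfind]; omega
            simp only [pvB, hswt, hcsw, Bool.false_eq_true, if_false, hjeq, hfind]
            rw [show (((l.length + 1 + j : Nat) : Int) + 1).toNat = l.length + 1 + (j + 1) from by omega]
            rw [pv_drop_shift l t (l.length + 1 + (j + 1)) (by omega)]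
            rw [show l.length + 1 + (j + 1) - l.length - 1 = j + 1 from by omega]
            rw [show ((j : Int) + 1).toNat = j + 1 from by omega]
            rw [if_neg (show ¬((j : Int) = -1) from by omega),
              if_neg (show ¬(((l.length + 1 + j : Nat) : Int) = -1) from by omega)]
    · have hsplit := pv_split_no_nl cs hnl []
      have hninf : ¬ pvPat <:+: cs := fun hh => hnl (hh.subset (by simp [pvPat]))
      have hfind : PySem.Chars.find cs pvPat = -1 :=
        (PySem.Chars.find_eq_neg_one_iff cs pvPat).mpr hninf
      by_cases hsw : PySem.Chars.startswith cs pvMod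
      · have hfm0 : pvFm (pvSplit [] cs) = some 0 := by
          rw [hsplit]; simp [pvFm, hsw]
        simp only [pvA, pvB, hfm0, hsw, if_true, List.drop_zero]
        rw [pv_join_split cs []]
        simp
      · have hfm0 : pvFm (pvSplit [] cs) = none := by
          rw [hsplit]; simp [pvFm, hsw]
        simp [pvA, pvB, hfm0, hsw, hfind]

-- str.split(sep) with a non-empty separator never raises
lemma pv_split?_some (cs sep : List Char) (h : sep ≠ []) :
    PySem.Chars.split? cs sep = some (PySem.Chars.splitOn cs sep) := by
  unfold PySem.Chars.split?
  simp [h]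

-- A's loop over enumerate computes pvFm (shifted by the start index)
lemma pv_loop_eq (lines : List String) : ∀ k : Int,
    remove_license_loop (PySem.List.enumerate lines k)
      = (pvFm (lines.map String.toList)).map (fun m => k + (m : Int)) := by
  induction lines with
  | nil => intro k; simp [PySem.List.enumerate_nil, remove_license_loop, pvFm]
  | cons l r ih =>
    intro k
    rw [PySem.List.enumerate_cons]
    simp only [remove_license_loop, pvFm, List.map_cons, PySem.Str.startswith_eq]
    by_cases hs : PySem.Chars.startswith l.toList pvMod
    · simp [hs, show ("module" : String).toList = pvMod from by decide]
    · simp only [show ("module" : String).toList = pvMod from rfl, hs, if_neg, Bool.false_eq_true,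
        not_false_eq_true]
      rw [ih (k + 1)]
      cases pvFm (r.map String.toList)
      · simp
      · simp
        omega

-- ===== VERDICT (by name: the statement is the Claim_ definition above) =====
theorem remove_license_spec : Claim_equal_remove_license := by
  intro code _
  unfold Spec_remove_license remove_license remove_license_alt
  obtain ⟨lines, hino, hmap⟩ :
      ∃ lines, PySem.Str.split? code "\n" = some lines ∧
        lines.map String.toList = pvSplit [] code.toList := by
    have hb := PySem.Str.split?_map code "\n"
    rw [show ("\n" : String).toList = ['\n'] from by decide,
      pv_split?_some _ _ (by decide), pv_splitOn_eq] at hb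
    cases hcase : PySem.Str.split? code "\n" with
    | none => rw [hcase] at hb; simp at hb
    | some lines =>
      rw [hcase] at hb
      simp only [Option.map_some, Option.some_inj] at hb
      exact ⟨lines, rfl, hb⟩
  rw [hino]
  simp only [Option.getD_some]
  rw [pv_loop_eq lines 0, hmap]
  have hmain : pvA code.toList = pvB code.toList := pv_main code.toList.length code.toList le_rfl
  cases hfm : pvFm (pvSplit [] code.toList) with
  | none =>
    simp only [Option.bind_eq_bind, Option.bind_none, Option.map_none]
    obtain ⟨hm, hinf⟩ := (pv_none_iff code.toList.length code.toList le_rfl).mp hfm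
    have hsw : PySem.Chars.startswith code.toList pvMod = false := by
      rw [Bool.eq_false_iff]
      intro hh
      exact hm ((PySem.Chars.startswith_iff _ _).mp hh)
    have hfind : PySem.Chars.find code.toList pvPat = -1 :=
      (PySem.Chars.find_eq_neg_one_iff _ _).mpr hinf
    simp only [pvMod, pvPat] at hsw hfind
    simp [hsw, hfind]
  | some m =>
    simp only [Option.bind_eq_bind, Option.bind_some, Option.pure_def, Option.map_some]
    have hAval : pvA code.toList
        = PySem.Chars.join ['\n'] ((pvSplit [] code.toList).drop m) := by
      simp [pvA, hfm]
    rw [PySem.List.slice_from lines (show (0 : Int) ≤ 0 + (m : Int) from by omega)]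
    rw [show ((0 : Int) + (m : Int)).toNat = m from by omega]
    apply String.toList_inj.mp
    rw [PySem.Str.toList_strip, PySem.Str.toList_join,
      show ("\n" : String).toList = ['\n'] from by decide]
    rw [show (lines.drop m).map String.toList = (pvSplit [] code.toList).drop m from by
      rw [← hmap, List.map_drop]]
    rw [← hAval, hmain]
    by_cases hswb : PySem.Str.startswith code "module"
    · have : PySem.Chars.startswith code.toList pvMod = true := by
        rw [← show ("module" : String).toList = pvMod from by decide, ← PySem.Str.startswith_eq]
        exact hswb
      simp only [pvMod] at this
      simp [pvB, pvMod, this, PySem.Str.toList_strip]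
    · have hswc : PySem.Chars.startswith code.toList pvMod = false := by
        rw [← show ("module" : String).toList = pvMod from by decide, ← PySem.Str.startswith_eq]
        exact Bool.eq_false_iff.mpr hswb
      have hfeq : PySem.Str.find code "\nmodule" = PySem.Chars.find code.toList pvPat := by
        rw [PySem.Str.find_eq, show ("\nmodule" : String).toList = pvPat from by decide]
      by_cases hfb : PySem.Str.find code "\nmodule" = -1
      · have : PySem.Chars.find code.toList pvPat = -1 := by rw [← hfeq]; exact hfb
        simp only [pvPat, pvMod] at this
        simp only [pvMod] at hswc
        simp [pvB, pvMod, pvPat, hswc, this, PySem.Str.toList_strip]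
      · have hfbc : PySem.Chars.find code.toList pvPat ≠ -1 := by rw [← hfeq]; exact hfb
        have hpos : 0 ≤ PySem.Str.find code "\nmodule" := by
          rw [hfeq]
          have := PySem.Chars.neg_one_le_find code.toList pvPat
          omega
        simp only [pvMod, pvPat] at hswc hfbc hfeq
        simp only [pvB, pvMod, pvPat, hswc, hfbc, Bool.false_eq_true, if_false, ne_eq]
        rw [if_neg hswb, if_pos hfb, PySem.Str.toList_strip, PySem.Str.toList_slice,
          PySem.Chars.slice_eq_listSlice, PySem.List.slice_from code.toList (by omega), hfeq]
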